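-- pv_equiv track=rewrite | github.com/VitoriaCamposRosa/atitus_pensComp_aulas | 05_Listas,_tuplas_e_lacos_de_repeticao/losango.py | desenha_losango
-- ===== SOURCE A (Python) =====
-- def desenha_losango(altura):
--     if altura < 3 or altura % 2 == 0:
--         return "Por favor, digite um número ímpar maior ou igual a 3."
--
--     linhas = []
--     for i in range(altura // 2 + 1):
--         espacos = " " * (altura // 2 - i)
--         asteriscos = "*" * (2 * i + 1)
--         linhas.append(espacos + asteriscos)
--
--     for i in range(altura // 2 - 1, -1, -1):
--         espacos = " " * (altura // 2 - i)
--         asteriscos = "*" * (2 * i + 1)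
--         linhas.append(espacos + asteriscos)
--
--     return "\n".join(linhas)
-- ===== SOURCE B (Python) =====
-- def desenha_losango(altura):
--     if altura < 3 or altura % 2 == 0:
--         return "Por favor, digite um número ímpar maior ou igual a 3."
--     mid = altura // 2
--     return "\n".join(
--         " " * abs(r - mid) + "*" * (altura - 2 * abs(r - mid))
--         for r in range(altura)
--     )
-- ===== Notes on version B (the rewrite author's own statement) =====
-- stated objective: simpler
-- what changed: The two directional loops building the top and bottom halves are replaced by a single symmetry-driven pass over range(altura) computing each row from abs(r - mid).
import Mathlib
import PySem

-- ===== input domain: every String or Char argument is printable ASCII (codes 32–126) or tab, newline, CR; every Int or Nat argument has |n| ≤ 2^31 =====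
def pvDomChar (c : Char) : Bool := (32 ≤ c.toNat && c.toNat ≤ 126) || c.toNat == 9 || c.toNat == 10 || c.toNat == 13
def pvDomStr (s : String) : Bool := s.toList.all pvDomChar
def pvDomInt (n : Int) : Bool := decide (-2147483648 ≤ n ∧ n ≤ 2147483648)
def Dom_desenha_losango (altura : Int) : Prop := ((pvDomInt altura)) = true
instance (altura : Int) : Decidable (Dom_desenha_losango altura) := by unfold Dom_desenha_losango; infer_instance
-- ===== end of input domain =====

-- B replaces A's two directional loops (top and bottom half of the diamond) by one
-- symmetry-driven pass over range(altura), computing each row from abs(r - mid). Objective: simpler.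

-- ===== PORT A =====
def desenha_losango (altura : Int) : String :=
  if altura < 3 ∨ PySem.Int.mod altura 2 == 0 then
    "Por favor, digite um número ímpar maior ou igual a 3."
  else
    let m := PySem.Int.floordiv altura 2
    let linhas := (PySem.List.pyRange 0 (m + 1) 1).foldl
      (fun acc i =>
        acc ++ [String.ofList (PySem.List.pyRepeat [' '] (m - i) ++
                           PySem.List.pyRepeat ['*'] (2 * i + 1))]) []
    let linhas := (PySem.List.pyRange (m - 1) (-1) (-1)).foldl
      (fun acc i =>
        acc ++ [String.ofList (PySem.List.pyRepeat [' '] (m - i) ++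
                           PySem.List.pyRepeat ['*'] (2 * i + 1))]) linhas
    PySem.Str.join "\n" linhas

-- ===== PORT B =====
def desenha_losango_alt (altura : Int) : String :=
  if altura < 3 ∨ PySem.Int.mod altura 2 == 0 then
    "Por favor, digite um número ímpar maior ou igual a 3."
  else
    let mid := PySem.Int.floordiv altura 2
    PySem.Str.join "\n" ((PySem.List.pyRange 0 altura 1).map
      (fun r => String.ofList (PySem.List.pyRepeat [' '] |r - mid| ++
                           PySem.List.pyRepeat ['*'] (altura - 2 * |r - mid|))))

-- ===== PRECONDITION & SPEC =====
def Spec_desenha_losango (altura : Int) (out : String) : Prop := out = desenha_losango_alt altura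
instance (altura : Int) (out : String) : Decidable (Spec_desenha_losango altura out) := by unfold Spec_desenha_losango; infer_instance

-- ===== CLAIM (what is proved, stated in full; the proofs are below) =====
def Claim_equal_desenha_losango : Prop := ∀ (altura : Int), Dom_desenha_losango altura → Spec_desenha_losango altura (desenha_losango altura)

-- ===== LEMMAS AND PROOFS =====

lemma desenha_losango_agree : ∀ (altura : Int), Dom_desenha_losango altura → desenha_losango altura = desenha_losango_alt altura := by
  intro a _
  unfold desenha_losango desenha_losango_alt
  by_cases h : a < 3 ∨ PySem.Int.mod a 2 == 0
  · rw [if_pos h, if_pos h]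
  · rw [if_neg h, if_neg h]
    push_neg at h
    obtain ⟨h3, hm2⟩ := h
    rw [PySem.Int.mod_eq_emod_of_pos (by norm_num)] at hm2
    replace hm2 : a % 2 ≠ 0 := by simpa using hm2
    rw [PySem.Int.floordiv_eq_ediv_of_pos (by norm_num : (0:Int) < 2)]
    obtain ⟨m, rfl⟩ : ∃ m, a = 2 * m + 1 := ⟨a / 2, by omega⟩
    have hdiv : (2 * m + 1) / 2 = m := by omega
    rw [hdiv]
    have hm1 : 1 ≤ m := by omega
    dsimp only
    congr 1
    rw [PySem.List.foldl_append_singleton_eq_map, PySem.List.foldl_append_singleton_eq_map]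
    rw [List.nil_append]
    rw [PySem.List.pyRange_one_append 0 (m + 1) (2 * m + 1) (by omega) (by omega), List.map_append]
    congr 1
    · apply List.map_congr_left
      intro x hx
      rw [PySem.List.mem_pyRange_one] at hx
      have h1 : |x - m| = m - x := by rw [abs_of_nonpos (by omega)]; ring
      rw [h1, show 2 * m + 1 - 2 * (m - x) = 2 * x + 1 from by ring]
    · rw [PySem.List.pyRange_one, PySem.List.pyRange_neg_one]
      rw [List.map_map, List.map_map]
      have he : (2 * m + 1 - (m + 1)).toNat = (m - 1 - (-1)).toNat := by omega
      rw [he]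
      apply List.map_congr_left
      intro k hk
      rw [List.mem_range] at hk
      simp only [Function.comp]
      have h1 : |m + 1 + (k : Int) - m| = m - (m - 1 - (k : Int)) := by
        rw [abs_of_nonneg (by omega)]; ring
      rw [h1, show 2 * m + 1 - 2 * (m - (m - 1 - (k : Int))) = 2 * (m - 1 - (k : Int)) + 1 from by ring]

-- ===== VERDICT (by name: the statement is the Claim_ definition above) =====
theorem desenha_losango_spec : Claim_equal_desenha_losango := by
  intro a h
  unfold Spec_desenha_losango
  exact desenha_losango_agree a h
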